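-- pv_equiv track=rewrite | github.com/artificial-scientist-lab/PyTheus | pytheus/graphplot.py | REMOVE_BS
-- ===== SOURCE A (Python) =====
-- import itertools, random, string
--
-- def REMOVE_BS(lst1 , lst2 ):
--     lst3 = []
--     lst1 = list(itertools.permutations(lst1, 2))
--     for ii in lst2:
--         for jj in lst1:
--             if ii == jj:
--                 lst3.append(ii)
--     lst2 = [x for x in lst2 if  x not in lst3]
--     return lst2
-- ===== SOURCE B (Python) =====
-- def REMOVE_BS(lst1, lst2):
--     def is_perm(ii):
--         if not (isinstance(ii, tuple) and len(ii) == 2):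
--             return False
--         a, b = ii
--         return a in lst1 and b in lst1 and (a != b or lst1.count(a) >= 2)
--     return [ii for ii in lst2 if not is_perm(ii)]
-- ===== Notes on version B (the rewrite author's own statement) =====
-- stated objective: faster
-- what changed: Instead of materialising all 2-permutations of lst1 and scanning them for every element of lst2, B filters lst2 in one pass with a direct membership/count predicate (a in lst1, b in lst1, a != b or count(a) >= 2).
import Mathlib
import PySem

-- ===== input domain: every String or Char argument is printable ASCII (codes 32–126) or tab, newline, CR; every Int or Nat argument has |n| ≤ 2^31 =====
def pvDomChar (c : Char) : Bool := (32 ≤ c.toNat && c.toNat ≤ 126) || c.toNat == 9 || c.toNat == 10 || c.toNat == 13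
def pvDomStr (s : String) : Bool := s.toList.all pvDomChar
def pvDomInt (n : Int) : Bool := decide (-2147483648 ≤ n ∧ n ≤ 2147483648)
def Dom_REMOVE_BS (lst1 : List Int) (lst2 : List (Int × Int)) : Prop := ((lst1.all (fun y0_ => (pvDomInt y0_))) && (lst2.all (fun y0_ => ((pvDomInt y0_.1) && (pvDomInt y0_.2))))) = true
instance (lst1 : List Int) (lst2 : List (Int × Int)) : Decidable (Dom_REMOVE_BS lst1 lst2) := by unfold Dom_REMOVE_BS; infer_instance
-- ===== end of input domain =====

-- B replaces A's enumeration of all 2-permutations of lst1 (and the nested scan over them)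
-- by a one-pass filter with a direct membership/count predicate; measurably faster on large inputs.

-- ===== PORT A =====
-- itertools.permutations(lst1, 2) is ported as List.offDiag (same pairs in the same order:
-- for each index n, pair lst1[n] with every element of lst1 with index n erased).
def REMOVE_BS (lst1 : List Int) (lst2 : List (Int × Int)) : List (Int × Int) :=
  let perms := lst1.offDiag
  let lst3 := lst2.foldl (fun acc ii =>
      perms.foldl (fun acc2 jj => if ii = jj then acc2 ++ [ii] else acc2) acc) []
  lst2.filter (fun x => decide (x ∉ lst3))

-- ===== PORT B =====
def REMOVE_BS_alt (lst1 : List Int) (lst2 : List (Int × Int)) : List (Int × Int) :=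
  lst2.filter (fun ii =>
    !(decide (ii.1 ∈ lst1) && decide (ii.2 ∈ lst1) &&
      (decide (ii.1 ≠ ii.2) || decide (2 ≤ lst1.count ii.1))))

-- ===== PRECONDITION & SPEC =====
def Spec_REMOVE_BS (lst1 : List Int) (lst2 : List (Int × Int)) (out : List (Int × Int)) : Prop := out = REMOVE_BS_alt lst1 lst2
instance (lst1 : List Int) (lst2 : List (Int × Int)) (out : List (Int × Int)) : Decidable (Spec_REMOVE_BS lst1 lst2 out) := by unfold Spec_REMOVE_BS; infer_instance

-- ===== CLAIM (what is proved, stated in full; the proofs are below) =====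
def Claim_equal_REMOVE_BS : Prop := ∀ (lst1 : List Int) (lst2 : List (Int × Int)), Dom_REMOVE_BS lst1 lst2 → Spec_REMOVE_BS lst1 lst2 (REMOVE_BS lst1 lst2)

-- ===== LEMMAS AND PROOFS =====

-- membership in the inner loop's accumulator
theorem mem_inner_foldl (perms : List (Int × Int)) (ii : Int × Int) (acc : List (Int × Int))
    (x : Int × Int) :
    x ∈ perms.foldl (fun acc2 jj => if ii = jj then acc2 ++ [ii] else acc2) acc ↔
      x ∈ acc ∨ (x = ii ∧ ii ∈ perms) := by
  induction perms generalizing acc with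
  | nil => simp
  | cons p ps ih =>
    simp only [List.foldl_cons, ih, List.mem_cons]
    split_ifs with h
    · subst h; simp [List.mem_append]; tauto
    · constructor
      · rintro (hx | ⟨rfl, hmem⟩)
        · exact Or.inl hx
        · exact Or.inr ⟨rfl, Or.inr hmem⟩
      · rintro (hx | ⟨rfl, (rfl | hmem)⟩)
        · exact Or.inl hx
        · exact absurd rfl h
        · exact Or.inr ⟨rfl, hmem⟩

-- membership in lst3 (the outer loop's accumulator)
theorem mem_lst3 (perms : List (Int × Int)) (lst2 : List (Int × Int)) (init : List (Int × Int))
    (x : Int × Int) :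
    x ∈ lst2.foldl (fun acc ii =>
        perms.foldl (fun acc2 jj => if ii = jj then acc2 ++ [ii] else acc2) acc) init ↔
      x ∈ init ∨ (x ∈ lst2 ∧ x ∈ perms) := by
  induction lst2 generalizing init with
  | nil => simp
  | cons y ys ih =>
    simp only [List.foldl_cons, ih, mem_inner_foldl, List.mem_cons]
    constructor
    · rintro ((hx | ⟨rfl, hp⟩) | ⟨hy, hp⟩)
      · exact Or.inl hx
      · exact Or.inr ⟨Or.inl rfl, hp⟩
      · exact Or.inr ⟨Or.inr hy, hp⟩
    · rintro (hx | ⟨rfl | hy, hp⟩)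
      · exact Or.inl (Or.inl hx)
      · exact Or.inl (Or.inr ⟨rfl, hp⟩)
      · exact Or.inr ⟨hy, hp⟩

-- (a,b) is a 2-permutation of l iff both occur, at distinct positions
theorem mem_offDiag_iff_pred (l : List Int) (a b : Int) :
    (a, b) ∈ l.offDiag ↔ (a ∈ l ∧ b ∈ l ∧ (a ≠ b ∨ 2 ≤ l.count a)) := by
  rw [← List.count_pos_iff, List.count_offDiag_eq_mul_sub_ite]
  by_cases h : a = b
  · subst h
    rw [if_pos rfl]
    constructor
    · intro hpos
      have hc : 2 ≤ l.count a := by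
        by_contra hlt
        push Not at hlt
        have : l.count a * l.count a ≤ 1 * l.count a := Nat.mul_le_mul_right _ (by omega)
        omega
      exact ⟨List.count_pos_iff.mp (by omega), List.count_pos_iff.mp (by omega), Or.inr hc⟩
    · rintro ⟨-, -, (hne | h2)⟩
      · exact absurd rfl hne
      · have h2c := Nat.mul_le_mul_right (l.count a) h2
        omega
  · rw [if_neg h, Nat.sub_zero]
    constructor
    · intro hpos
      rcases Nat.eq_zero_or_pos (l.count a) with h0 | ha
      · rw [h0, Nat.zero_mul] at hpos; omega
      rcases Nat.eq_zero_or_pos (l.count b) with h0 | hb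
      · rw [h0, Nat.mul_zero] at hpos; omega
      exact ⟨List.count_pos_iff.mp ha, List.count_pos_iff.mp hb, Or.inl h⟩
    · rintro ⟨ha, hb, -⟩
      exact Nat.mul_pos (List.count_pos_iff.mpr ha) (List.count_pos_iff.mpr hb)

-- ===== VERDICT (by name: the statement is the Claim_ definition above) =====
theorem REMOVE_BS_spec : Claim_equal_REMOVE_BS := by
  intro lst1 lst2 _
  unfold Spec_REMOVE_BS REMOVE_BS REMOVE_BS_alt
  apply List.filter_congr
  intro x hx
  rcases x with ⟨a, b⟩
  simp only [mem_lst3, List.mem_nil_iff, false_or, mem_offDiag_iff_pred,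
    ← Bool.decide_and, ← Bool.decide_or, ← decide_not, decide_eq_decide]
  constructor
  · intro hn h; exact hn ⟨hx, h.1.1, h.1.2, h.2⟩
  · intro hn h; exact hn ⟨⟨h.2.1, h.2.2.1⟩, h.2.2.2⟩
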